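-- pv_equiv track=rewrite | github.com/chenyong-cpu/machine-learning | markdown/12周报/code/代码.py | word_merge
-- ===== SOURCE A (Python) =====
-- def word_merge(sentence, max_ngram_length = 4):
--     '''合并文本中连续重复的词'''
--     final_merge_sent = sentence
--     max_ngram_length = min(max_ngram_length, len(sentence))
--     for i in range(max_ngram_length, 0, -1):
--         start = 0
--         end = len(final_merge_sent) - i + 1
--         ngrams = []
--         while start < end:
--             ngrams.append(final_merge_sent[start: start + i])
--             start += 1
--         result = []
--         for cur_word in ngrams:
--             result.append(cur_word)
--             if len(result) > i:
--                 pre_word = result[len(result) - i - 1]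
--                 if pre_word == cur_word:
--                     for k in range(i):
--                         result.pop()
--         cur_merge_sent = ""
--         for word in result:
--             if not cur_merge_sent:
--                 cur_merge_sent += word
--             else:
--                 cur_merge_sent += word[-1]
--         final_merge_sent = cur_merge_sent
--     return final_merge_sent
-- ===== SOURCE B (Python) =====
-- def word_merge(sentence, max_ngram_length = 4):
--     '''合并文本中连续重复的词'''
--     cur = sentence
--     for i in range(min(max_ngram_length, len(sentence)), 0, -1):
--         out = []
--         for ch in cur:
--             out.append(ch)
--             if len(out) >= 2 * i and out[-2 * i:-i] == out[-i:]:
--                 del out[-i:]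
--         cur = "".join(out)
--     return cur
-- ===== Notes on version B (the rewrite author's own statement) =====
-- stated objective: simpler
-- what changed: Each pass now processes the string one character at a time into a single character stack, deleting the trailing i characters when the two adjacent length-i blocks at the top are equal, which eliminates A's explicit n-gram list construction, its index-based pre_word lookup with i successive pops, and the final first-word-plus-last-characters reconstruction loop.
import Mathlib
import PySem

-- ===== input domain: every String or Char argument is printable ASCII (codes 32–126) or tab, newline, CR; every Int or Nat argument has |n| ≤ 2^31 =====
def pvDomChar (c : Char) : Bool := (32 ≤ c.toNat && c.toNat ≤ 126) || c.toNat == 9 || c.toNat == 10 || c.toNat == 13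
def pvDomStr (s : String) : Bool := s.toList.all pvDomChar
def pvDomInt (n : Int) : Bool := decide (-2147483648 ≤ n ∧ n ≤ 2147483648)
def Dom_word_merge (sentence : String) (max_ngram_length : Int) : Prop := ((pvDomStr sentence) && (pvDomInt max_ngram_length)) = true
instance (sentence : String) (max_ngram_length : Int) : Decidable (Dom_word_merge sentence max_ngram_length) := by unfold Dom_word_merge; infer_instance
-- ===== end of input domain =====

-- B replaces A's per-pass n-gram list building, merging and reconstruction by a single
-- character stack with slice comparisons (objective: simpler; same asymptotic cost).

-- ===== PORT A =====
-- `word[-1]` as a one-character list; the `none` branch is unreachable because every ngram is nonempty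
def pvLast1 (w : List Char) : List Char :=
  match w.getLast? with
  | some c => [c]
  | none => []

-- `for k in range(i): result.pop()`
def pvPopN (i : Nat) (r : List (List Char)) : List (List Char) :=
  (List.range i).foldl (fun r2 _ => r2.dropLast) r

-- the body of `for cur_word in ngrams: ...`
def pvStepA (i : Nat) (r : List (List Char)) (w : List Char) : List (List Char) :=
  let r1 := r ++ [w]
  if i < r1.length then
    -- pre_word = result[len(result) - i - 1]; the index is in range because len(result) > i
    if r1.getD (r1.length - i - 1) [] == w then pvPopN i r1 else r1
  else r1

-- one iteration of A's outer loop: build the i-gram list, merge repeats, reconstruct the string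
def pvPassA (s : List Char) (i : Nat) : List Char :=
  let ngrams := (PySem.List.pyRange 0 ((s.length : Int) - (i : Int) + 1) 1).foldl
      (fun ng st => ng ++ [PySem.List.slice s (some st) (some (st + (i : Int)))]) []
  let result := ngrams.foldl (pvStepA i) []
  result.foldl (fun acc w => if acc.isEmpty then acc ++ w else acc ++ pvLast1 w) []

def word_merge (sentence : String) (max_ngram_length : Int) : String :=
  let s0 := sentence.toList
  String.mk ((PySem.List.pyRange (min max_ngram_length (s0.length : Int)) 0 (-1)).foldl
    (fun cur ii => pvPassA cur ii.toNat) s0)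

-- ===== PORT B =====
-- the body of `for ch in cur: ...` — push the character, pop i characters when the two
-- trailing length-i blocks agree
def pvStepB (i : Nat) (out : List Char) (c : Char) : List Char :=
  let o := out ++ [c]
  if 2 * i ≤ o.length ∧
      PySem.List.slice o (some (-(2 * (i : Int)))) (some (-(i : Int)))
        = PySem.List.slice o (some (-(i : Int))) none then
    o.take (o.length - i)  -- del out[-i:]
  else o

def pvPassB (s : List Char) (i : Nat) : List Char := s.foldl (pvStepB i) []

def word_merge_alt (sentence : String) (max_ngram_length : Int) : String :=
  let s0 := sentence.toList
  String.mk ((PySem.List.pyRange (min max_ngram_length (s0.length : Int)) 0 (-1)).foldl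
    (fun cur ii => pvPassB cur ii.toNat) s0)

-- ===== PRECONDITION & SPEC =====
def Spec_word_merge (sentence : String) (max_ngram_length : Int) (out : String) : Prop := out = word_merge_alt sentence max_ngram_length
instance (sentence : String) (max_ngram_length : Int) (out : String) : Decidable (Spec_word_merge sentence max_ngram_length out) := by unfold Spec_word_merge; infer_instance

-- ===== CLAIM (what is proved, stated in full; the proofs are below) =====
def Claim_equal_word_merge : Prop := ∀ (sentence : String) (max_ngram_length : Int), Dom_word_merge sentence max_ngram_length → Spec_word_merge sentence max_ngram_length (word_merge sentence max_ngram_length)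

-- ===== LEMMAS AND PROOFS =====

theorem pvLenPos {a : Type} (l : List a) (h : l ≠ []) : 0 < l.length := by
  cases l with
  | nil => exact absurd rfl h
  | cons x t => simp

-- `out[-i:]` is the last i characters
theorem pvSliceFrom (o : List Char) (i : Nat) (h1 : 1 ≤ i) :
    PySem.List.slice o (some (-(i : Int))) none = o.drop (o.length - i) :=
  PySem.List.slice_from_neg_natCast o i h1

-- `out[-2*i:-i]` is the length-i block before the last i characters
theorem pvSliceMid (o : List Char) (i : Nat) (h1 : 1 ≤ i) :
    PySem.List.slice o (some (-(2 * (i : Int)))) (some (-(i : Int)))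
      = (o.drop (o.length - 2 * i)).take ((o.length - i) - (o.length - 2 * i)) := by
  have h2 : (-(2 * (i : Int))) = (-(((2 * i : Nat)) : Int)) := by push_cast; ring
  simp only [PySem.List.slice, h2,
    PySem.List.clampIdx_neg_natCast o.length (2 * i) (by omega),
    PySem.List.clampIdx_neg_natCast o.length i h1]

theorem pvFoldlSnocMap {A B : Type} (f : A → B) :
    ∀ (l : List A) (acc : List B), l.foldl (fun a x => a ++ [f x]) acc = acc ++ l.map f := by
  intro l
  induction l with
  | nil => simp
  | cons x xs ih => intro acc; simp [ih]

theorem pvPopN_eq_take (i : Nat) (r : List (List Char)) : pvPopN i r = r.take (r.length - i) := by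
  induction i with
  | zero => simp [pvPopN]
  | succ k ih =>
    unfold pvPopN
    rw [List.range_succ, List.foldl_append]
    have e0 : (List.range k).foldl (fun r2 _ => r2.dropLast) r = r.take (r.length - k) := ih
    rw [e0]
    simp only [List.foldl_cons, List.foldl_nil]
    rw [List.dropLast_eq_take, List.take_take, List.length_take]
    congr 1
    omega

-- A's step, written as one conditional over the appended list
theorem pvStepA_eq (i : Nat) (r : List (List Char)) (w : List Char) :
    pvStepA i r w =
      if i ≤ r.length ∧ (r ++ [w]).getD (r.length - i) [] = w
      then (r ++ [w]).take (r.length + 1 - i) else r ++ [w] := by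
  simp only [pvStepA, pvPopN_eq_take]
  have hl : (r ++ [w]).length = r.length + 1 := by simp
  rw [hl]
  by_cases hg : i ≤ r.length
  · rw [if_pos (show i < r.length + 1 by omega)]
    have e1 : r.length + 1 - i - 1 = r.length - i := by omega
    rw [e1]
    by_cases hpre : (r ++ [w]).getD (r.length - i) [] = w
    · rw [if_pos (beq_iff_eq.mpr hpre), if_pos ⟨hg, hpre⟩]
    · rw [if_neg (fun hcon => hpre (beq_iff_eq.mp hcon)), if_neg (fun hcon => hpre hcon.2)]
  · rw [if_neg (show ¬ i < r.length + 1 by omega), if_neg (fun hcon => hg hcon.1)]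

-- the invariant tying A's n-gram list `r` to B's character stack `out` before
-- window j is processed: lengths agree, every length-i block of `out` starting at
-- position t is the t-th stored n-gram, and the i trailing characters of `out` are
-- the window at position j-1
def pvInv (s : List Char) (i j : Nat) (r : List (List Char)) (out : List Char) : Prop :=
  r ≠ [] ∧ out.length = r.length + i - 1 ∧
  (∀ t, t < r.length → (out.drop t).take i = r.getD t []) ∧
  out.drop (out.length - i) = (s.drop (j - 1)).take i

theorem pvStep_equiv (s : List Char) (i j : Nat) (r : List (List Char)) (out : List Char)
    (c : Char) (hi : 1 ≤ i) (hj : 1 ≤ j) (hji : j + i ≤ s.length)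
    (hc : (s.drop j).take i = (s.drop j).take (i - 1) ++ [c])
    (h : pvInv s i j r out) :
    pvInv s i (j + 1) (pvStepA i r ((s.drop j).take i)) (pvStepB i out c) := by
  obtain ⟨hne, hlen, hQ, htl⟩ := h
  have hr1 : 0 < r.length := pvLenPos r hne
  have houtlen : i ≤ out.length := by omega
  have holen : (out ++ [c]).length = r.length + i := by simp only [List.length_append, List.length_cons, List.length_nil, List.length_take, List.length_drop]; omega
  have hwlen : ((s.drop j).take i).length = i := by simp only [List.length_append, List.length_cons, List.length_nil, List.length_take, List.length_drop]; omega
  -- the i trailing characters of out ++ [c] form the window at position j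
  have tailA : (out ++ [c]).drop ((out ++ [c]).length - i) = (s.drop j).take i := by
    have e0 : (out ++ [c]).length - i = out.length + 1 - i := by simp only [List.length_append, List.length_cons, List.length_nil]
    have e2 : (out ++ [c]).drop (out.length + 1 - i) = out.drop (out.length + 1 - i) ++ [c] :=
      List.drop_append_of_le_length (by omega)
    have e3 : out.drop (out.length + 1 - i) = (out.drop (out.length - i)).drop 1 := by
      rw [List.drop_drop]
      congr 1
      omega
    have e5 : (j - 1) + 1 = j := by omega
    have e4 : ((s.drop (j - 1)).take i).drop 1 = (s.drop j).take (i - 1) := by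
      rw [List.drop_take, List.drop_drop, e5]
    rw [e0, e2, e3, htl, e4, ← hc]
  -- every length-i block of out ++ [c] is the corresponding entry of r ++ [window j]
  have hQ' : ∀ t, t < r.length + 1 →
      ((out ++ [c]).drop t).take i = (r ++ [(s.drop j).take i]).getD t [] := by
    intro t ht
    rcases Nat.lt_or_ge t r.length with hlt | hge
    · have e1 : (out ++ [c]).drop t = out.drop t ++ [c] :=
        List.drop_append_of_le_length (by omega)
      have e2 : (out.drop t ++ [c]).take i = (out.drop t).take i :=
        List.take_append_of_le_length (by simp only [List.length_append, List.length_cons, List.length_nil, List.length_take, List.length_drop]; omega)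
      rw [e1, e2, hQ t hlt, List.getD_eq_getElem?_getD, List.getD_eq_getElem?_getD,
        List.getElem?_append_left hlt]
    · have hteq : t = r.length := by omega
      subst hteq
      rw [List.getD_eq_getElem?_getD, List.getElem?_concat_length]
      have e1 : r.length = (out ++ [c]).length - i := by omega
      rw [e1, tailA, List.take_of_length_le (by rw [hwlen])]
      rfl
  -- B's step, written as the same conditional
  have hstepB : pvStepB i out c =
      if i ≤ r.length ∧ (r ++ [(s.drop j).take i]).getD (r.length - i) [] = (s.drop j).take i
      then (out ++ [c]).take ((out ++ [c]).length - i) else out ++ [c] := by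
    simp only [pvStepB]
    by_cases hg : i ≤ r.length
    · have hcnd : 2 * i ≤ (out ++ [c]).length := by omega
      have hlast : PySem.List.slice (out ++ [c]) (some (-(i : Int))) none
          = (s.drop j).take i := by
        rw [pvSliceFrom _ _ hi]
        exact tailA
      have hmid : PySem.List.slice (out ++ [c]) (some (-(2 * (i : Int)))) (some (-(i : Int)))
          = (r ++ [(s.drop j).take i]).getD (r.length - i) [] := by
        rw [pvSliceMid _ _ hi]
        have e2 : (out ++ [c]).length - i - ((out ++ [c]).length - 2 * i) = i := by omega
        have e1 : (out ++ [c]).length - 2 * i = r.length - i := by omega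
        rw [e2, e1]
        exact hQ' (r.length - i) (by omega)
      simp only [hmid, hlast]
      by_cases hpre : (r ++ [(s.drop j).take i]).getD (r.length - i) [] = (s.drop j).take i
      · rw [if_pos ⟨hcnd, hpre⟩, if_pos ⟨hg, hpre⟩]
      · rw [if_neg (fun hcon => hpre hcon.2), if_neg (fun hcon => hpre hcon.2)]
    · rw [if_neg ?hng, if_neg (fun hcon => hg hcon.1)]
      case hng =>
        intro hcon
        have h1 := hcon.1
        rw [holen] at h1
        omega
  unfold pvInv
  rw [pvStepA_eq, hstepB]
  by_cases hcond : i ≤ r.length ∧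
      (r ++ [(s.drop j).take i]).getD (r.length - i) [] = (s.drop j).take i
  · -- merge fires: both stacks drop i entries / characters
    rw [if_pos hcond, if_pos hcond]
    obtain ⟨hg, hpre⟩ := hcond
    have hr2len : ((r ++ [(s.drop j).take i]).take (r.length + 1 - i)).length
        = r.length + 1 - i := by
      rw [List.length_take]
      have : (r ++ [(s.drop j).take i]).length = r.length + 1 := by simp only [List.length_append, List.length_cons, List.length_nil]
      omega
    have ho2len : ((out ++ [c]).take ((out ++ [c]).length - i)).length = r.length := by
      rw [List.length_take, holen]
      omega
    refine ⟨?_, ?_, ?_, ?_⟩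
    · intro hcontra
      have hl2 := congrArg List.length hcontra
      rw [hr2len] at hl2
      simp at hl2
      omega
    · rw [ho2len, hr2len]
      omega
    · intro t ht
      rw [hr2len] at ht
      have e1 : ((out ++ [c]).take ((out ++ [c]).length - i)).drop t
          = ((out ++ [c]).drop t).take ((out ++ [c]).length - i - t) := List.drop_take
      have e2 : (((out ++ [c]).drop t).take ((out ++ [c]).length - i - t)).take i
          = ((out ++ [c]).drop t).take i := by
        rw [List.take_take]
        congr 1
        omega
      rw [e1, e2, hQ' t (by omega), List.getD_eq_getElem?_getD, List.getD_eq_getElem?_getD,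
        List.getElem?_take_of_lt (by omega)]
    · rw [ho2len]
      have e1 : ((out ++ [c]).take ((out ++ [c]).length - i)).drop (r.length - i)
          = ((out ++ [c]).drop (r.length - i)).take
              ((out ++ [c]).length - i - (r.length - i)) := List.drop_take
      have e2 : (out ++ [c]).length - i - (r.length - i) = i := by omega
      have e3 : j + 1 - 1 = j := by omega
      rw [e1, e2, hQ' (r.length - i) (by omega), hpre, e3]
  · -- no merge: both stacks just keep the new entry / character
    rw [if_neg hcond, if_neg hcond]
    refine ⟨by simp, by rw [holen]; simp only [List.length_append, List.length_cons, List.length_nil, List.length_take, List.length_drop]; omega, ?_, ?_⟩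
    · intro t ht
      rw [List.length_append] at ht
      exact hQ' t (by simpa using ht)
    · have e3 : j + 1 - 1 = j := by omega
      rw [e3, tailA]

theorem pvMain (s : List Char) (i : Nat) (hi : 1 ≤ i) :
    ∀ (n j : Nat) (r : List (List Char)) (out : List Char),
      1 ≤ j → j + n + i ≤ s.length + 1 → pvInv s i j r out →
      pvInv s i (j + n)
        (((List.range' j n).map (fun k => (s.drop k).take i)).foldl (pvStepA i) r)
        (((s.drop (j + i - 1)).take n).foldl (pvStepB i) out) := by
  intro n
  induction n with
  | zero => intro j r out _ _ h; simpa using h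
  | succ m ih =>
    intro j r out hj hbound h
    have hji : j + i ≤ s.length := by omega
    have hlt : j + i - 1 < s.length := by omega
    have e0 : j + i - 1 + 1 = j + i := by omega
    have hdrop : s.drop (j + i - 1) = s[j + i - 1] :: s.drop (j + i) := by
      rw [List.drop_eq_getElem_cons hlt, e0]
    have e1 : j + 1 + i - 1 = j + i := by omega
    have hchars : (s.drop (j + i - 1)).take (m + 1)
        = s[j + i - 1] :: (s.drop (j + 1 + i - 1)).take m := by
      rw [hdrop, e1, List.take_succ_cons]
    have h5 : (s.drop j)[i - 1]? = some s[j + i - 1] := by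
      rw [List.getElem?_drop]
      have e3 : j + (i - 1) = j + i - 1 := by omega
      rw [e3]
      exact List.getElem?_eq_getElem hlt
    have hc : (s.drop j).take i = (s.drop j).take (i - 1) ++ [s[j + i - 1]] := by
      have e2 : i - 1 + 1 = i := by omega
      calc (s.drop j).take i = (s.drop j).take (i - 1 + 1) := by rw [e2]
        _ = (s.drop j).take (i - 1) ++ (s.drop j)[i - 1]?.toList := List.take_succ
        _ = (s.drop j).take (i - 1) ++ [s[j + i - 1]] := by rw [h5]; rfl
    rw [List.range'_succ, hchars]
    simp only [List.map_cons, List.foldl_cons]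
    have hstep := pvStep_equiv s i j r out (s[j + i - 1]) hi hj hji hc h
    have hrec := ih (j + 1) (pvStepA i r ((s.drop j).take i)) (pvStepB i out (s[j + i - 1]))
      (by omega) (by omega) hstep
    have e4 : j + 1 + m = j + (m + 1) := by omega
    rwa [e4] at hrec

theorem pvGetLast?_drop (l : List Char) : ∀ (n : Nat), n < l.length →
    (l.drop n).getLast? = l.getLast? := by
  induction l with
  | nil => intro n h; simp at h
  | cons a t ih =>
    intro n h
    cases n with
    | zero => simp
    | succ m =>
      simp only [List.drop_succ_cons]
      rw [ih m (by simp at h; omega)]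
      cases t with
      | nil => simp at h
      | cons b u => simp

-- out is recovered from the n-gram list by A's reconstruction fold
theorem pvRecon (i : Nat) (hi : 1 ≤ i) :
    ∀ (r : List (List Char)) (out : List Char), r ≠ [] →
      out.length = r.length + i - 1 →
      (∀ t, t < r.length → (out.drop t).take i = r.getD t []) →
      r.foldl (fun acc w => if acc.isEmpty then acc ++ w else acc ++ pvLast1 w) [] = out := by
  intro r
  induction r using List.reverseRecOn with
  | nil => intro out hne _ _; exact absurd rfl hne
  | append_singleton r' w ih =>
    intro out _ hlen hQ
    have hrlen : (r' ++ [w]).length = r'.length + 1 := by simp only [List.length_append, List.length_cons, List.length_nil]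
    by_cases hr' : r' = []
    · subst hr'
      have hoL : out.length = i := by rw [hrlen] at hlen; simpa using hlen
      have h0 := hQ 0 (by rw [hrlen]; omega)
      rw [List.drop_zero, List.take_of_length_le (by omega)] at h0
      simp at h0
      rw [h0]
      simp
    · have hr'len : 0 < r'.length := pvLenPos r' hr'
      have hlen' : out.length = r'.length + i := by rw [hrlen] at hlen; omega
      have houtne : out ≠ [] := by
        intro hcontra
        have h2 := congrArg List.length hcontra
        rw [hlen'] at h2
        simp at h2
        exact hr' h2.1
      have hQ' : ∀ t, t < r'.length → (out.dropLast.drop t).take i = r'.getD t [] := by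
        intro t ht
        have e1 : out.dropLast.drop t = (out.drop t).take (out.length - 1 - t) := by
          rw [List.dropLast_eq_take, List.drop_take]
        have e2 : ((out.drop t).take (out.length - 1 - t)).take i = (out.drop t).take i := by
          rw [List.take_take]
          congr 1
          omega
        rw [e1, e2, hQ t (by omega), List.getD_eq_getElem?_getD,
          List.getD_eq_getElem?_getD, List.getElem?_append_left ht]
      have ihout := ih out.dropLast hr' (by rw [List.length_dropLast]; omega) hQ'
      rw [List.foldl_append, ihout]
      simp only [List.foldl_cons, List.foldl_nil]
      have hdlne : out.dropLast ≠ [] := by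
        intro hco
        have := congrArg List.length hco
        rw [List.length_dropLast] at this
        simp at this
        omega
      rw [if_neg (by simpa using hdlne)]
      -- w is the i trailing characters of out, so its last character is out's last
      have hwdrop : w = out.drop r'.length := by
        have h1 := hQ r'.length (by omega)
        rw [List.getD_eq_getElem?_getD, List.getElem?_concat_length] at h1
        rw [List.take_of_length_le (by rw [List.length_drop]; omega)] at h1
        simpa using h1.symm
      have hwlast : w.getLast? = some (out.getLast houtne) := by
        rw [hwdrop, pvGetLast?_drop out r'.length (by omega)]
        exact List.getLast?_eq_some_getLast houtne
      have hlast1 : pvLast1 w = [out.getLast houtne] := by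
        simp only [pvLast1, hwlast]
      rw [hlast1, List.dropLast_append_getLast houtne]

theorem pvPrefixB (i : Nat) :
    ∀ (u acc : List Char), acc.length + u.length ≤ 2 * i - 1 →
      u.foldl (pvStepB i) acc = acc ++ u := by
  intro u
  induction u with
  | nil => intro acc _; simp
  | cons c cs ih =>
    intro acc hlen
    have hlen' : acc.length + (cs.length + 1) ≤ 2 * i - 1 := by simpa using hlen
    simp only [List.foldl_cons]
    have hstep : pvStepB i acc c = acc ++ [c] := by
      rw [pvStepB, if_neg]
      intro hcontra
      have h1 := hcontra.1
      rw [List.length_append] at h1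
      simp at h1
      omega
    rw [hstep, ih (acc ++ [c]) (by simp only [List.length_append, List.length_cons, List.length_nil, List.length_take, List.length_drop]; omega)]
    simp

theorem pvNgrams_eq (s : List Char) (i : Nat) (hL : i ≤ s.length) :
    (PySem.List.pyRange 0 ((s.length : Int) - (i : Int) + 1) 1).foldl
        (fun ng st => ng ++ [PySem.List.slice s (some st) (some (st + (i : Int)))]) []
      = (List.range (s.length - i + 1)).map (fun k => (s.drop k).take i) := by
  rw [pvFoldlSnocMap, PySem.List.pyRange_one, List.map_map]
  have ht : (((s.length : Int) - (i : Int) + 1) - 0).toNat = s.length - i + 1 := by omega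
  rw [ht]
  simp only [List.nil_append]
  apply List.map_congr_left
  intro k _
  simp only [Function.comp_apply, zero_add]
  exact PySem.List.slice_natCast_add s k i

theorem pvPass_eq (s : List Char) (i : Nat) (hi : 1 ≤ i) (hL : i ≤ s.length) :
    pvPassA s i = pvPassB s i ∧ i ≤ (pvPassB s i).length := by
  have hB : pvPassB s i = (s.drop i).foldl (pvStepB i) (s.take i) := by
    conv_lhs => rw [pvPassB, ← List.take_append_drop i s]
    rw [List.foldl_append, pvPrefixB i (s.take i) [] (by simp only [List.length_nil, List.length_take]; omega)]
    simp
  have htk : (s.take i).length = i := by simp only [List.length_take]; omega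
  have hbase : pvInv s i 1 [s.take i] (s.take i) := by
    unfold pvInv
    refine ⟨by simp, by simp [htk], ?_, ?_⟩
    · intro t ht
      have ht0 : t = 0 := by simp at ht; omega
      subst ht0
      rw [List.drop_zero, List.take_take]
      simp
    · rw [htk, Nat.sub_self, List.drop_zero, List.drop_zero]
  have hmain := pvMain s i hi (s.length - i) 1 [s.take i] (s.take i)
    (by omega) (by omega) hbase
  have echars : (s.drop (1 + i - 1)).take (s.length - i) = s.drop i := by
    have e1 : 1 + i - 1 = i := by omega
    rw [e1, List.take_of_length_le (by rw [List.length_drop])]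
  rw [echars] at hmain
  obtain ⟨hne, hlen, hQ, -⟩ := hmain
  constructor
  · simp only [pvPassA]
    rw [pvNgrams_eq s i hL, hB]
    have hrange : List.range (s.length - i + 1) = 0 :: List.range' 1 (s.length - i) := by
      rw [List.range_eq_range', List.range'_succ]
    rw [hrange]
    simp only [List.map_cons, List.foldl_cons]
    have hfirst : pvStepA i [] ((s.drop 0).take i) = [(s.drop 0).take i] := by
      rw [pvStepA_eq, if_neg (fun hcon => by have := hcon.1; simp at this; omega)]
      simp
    rw [hfirst]
    simp only [List.drop_zero]
    exact pvRecon i hi _ _ hne hlen hQ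
  · have hr1 := pvLenPos _ hne
    rw [hB]
    omega

theorem pvOuter : ∀ (k : Nat) (cur : List Char), k ≤ cur.length →
    (PySem.List.pyRange (k : Int) 0 (-1)).foldl (fun c ii => pvPassA c ii.toNat) cur
      = (PySem.List.pyRange (k : Int) 0 (-1)).foldl (fun c ii => pvPassB c ii.toNat) cur := by
  intro k
  induction k with
  | zero =>
    intro cur _
    rw [PySem.List.pyRange_neg_one_eq_nil (by simp)]
    rfl
  | succ m ih =>
    intro cur hk
    have hcons : PySem.List.pyRange ((m + 1 : Nat) : Int) 0 (-1)
        = ((m + 1 : Nat) : Int) :: PySem.List.pyRange ((m : Nat) : Int) 0 (-1) := by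
      rw [PySem.List.pyRange_neg_one_cons (by push_cast; omega)]
      have e : ((m + 1 : Nat) : Int) - 1 = ((m : Nat) : Int) := by push_cast; omega
      rw [e]
    rw [hcons]
    simp only [List.foldl_cons]
    have ht : ((m + 1 : Nat) : Int).toNat = m + 1 := by omega
    rw [ht]
    have hpass := pvPass_eq cur (m + 1) (by omega) hk
    rw [hpass.1]
    exact ih (pvPassB cur (m + 1)) (by have := hpass.2; omega)

-- ===== VERDICT (by name: the statement is the Claim_ definition above) =====
theorem word_merge_spec : Claim_equal_word_merge := by
  intro sentence max_ngram_length _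
  unfold Spec_word_merge word_merge word_merge_alt
  dsimp only
  generalize sentence.toList = s0
  by_cases hMle : min max_ngram_length ((s0.length : Nat) : Int) ≤ 0
  · rw [PySem.List.pyRange_neg_one_eq_nil hMle]
    rfl
  · have hEq : min max_ngram_length ((s0.length : Nat) : Int)
        = (((min max_ngram_length ((s0.length : Nat) : Int)).toNat : Nat) : Int) := by omega
    rw [hEq]
    refine congrArg String.mk (pvOuter _ s0 ?_)
    have hmin : min max_ngram_length ((s0.length : Nat) : Int) ≤ ((s0.length : Nat) : Int) :=
      min_le_right _ _
    omega
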